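-- pv_equiv track=rewrite | github.com/Thionazin/TAMU-HNR-ENGR-102-Assignments-Fall-2020 | src/unit12/Lab12_Act1b.py | least_profit
-- ===== SOURCE A (Python) =====
-- def least_profit(names, costs, value):
--     # Sets everything to the 0th for now
--     worst_name = names[0]
--     worst = value[0] - costs[0]
--     # Loops through the elements in the list
--     for i in range(1, len(names)):
--         # If statement to check if the ith position element is worse
--         if value[i] - costs[i] <= worst:
--             worst = value[i] - costs[i]
--             worst_name = names[i]
--     # Returns the result as a string
--     return str(worst_name) + " with a net profitability of " + str(worst)
-- ===== SOURCE B (Python) =====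
-- def least_profit(names, costs, value):
--     # Different decomposition: build the profit list once, take its minimum,
--     # then pick the LAST index attaining it (A's <= tie-break is last-wins).
--     profits = [value[i] - costs[i] for i in range(len(names))]
--     worst = min(profits)
--     j = len(profits) - 1 - profits[::-1].index(worst)
--     return str(names[j]) + " with a net profitability of " + str(worst)
-- ===== Notes on version B (the rewrite author's own statement) =====
-- stated objective: simpler
-- what changed: Replaces the single stateful best-so-far loop by a three-step decomposition: build the profit list, take min(), then locate the last index attaining it via a reversed-list index lookup (matching A's <= last-wins tie-break).
import Mathlib
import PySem

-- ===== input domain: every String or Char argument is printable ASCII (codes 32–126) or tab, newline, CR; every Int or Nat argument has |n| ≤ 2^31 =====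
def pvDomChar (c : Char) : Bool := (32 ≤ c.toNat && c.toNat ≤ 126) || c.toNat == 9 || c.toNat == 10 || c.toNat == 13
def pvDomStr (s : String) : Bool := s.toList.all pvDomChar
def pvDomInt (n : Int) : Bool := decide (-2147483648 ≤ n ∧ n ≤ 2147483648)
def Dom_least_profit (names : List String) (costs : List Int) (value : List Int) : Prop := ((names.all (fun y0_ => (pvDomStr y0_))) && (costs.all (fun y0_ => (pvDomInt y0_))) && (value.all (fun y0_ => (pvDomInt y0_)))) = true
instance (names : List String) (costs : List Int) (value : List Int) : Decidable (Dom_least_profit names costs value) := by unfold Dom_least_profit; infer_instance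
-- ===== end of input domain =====

-- B replaces A's stateful best-so-far loop by: build the profit list, take its min,
-- pick the last index attaining it (objective: simpler decomposition, same cost).


-- ===== PORT A =====
def least_profit (names : List String) (costs : List Int) (value : List Int) : String :=
  -- worst_name = names[0]; worst = value[0] - costs[0]  (in range under Pre_)
  let init : String × Int :=
    (PySem.List.pyGetD names 0 "", PySem.List.pyGetD value 0 0 - PySem.List.pyGetD costs 0 0)
  -- for i in range(1, len(names)): if value[i] - costs[i] <= worst: update
  let st := (PySem.List.pyRange 1 (names.length : Int) 1).foldl
    (fun (st : String × Int) i =>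
      if PySem.List.pyGetD value i 0 - PySem.List.pyGetD costs i 0 ≤ st.2 then
        (PySem.List.pyGetD names i "", PySem.List.pyGetD value i 0 - PySem.List.pyGetD costs i 0)
      else st) init
  st.1 ++ " with a net profitability of " ++ PySem.Int.toStr st.2

-- ===== PORT B =====
def least_profit_alt (names : List String) (costs : List Int) (value : List Int) : String :=
  -- profits = [value[i] - costs[i] for i in range(len(names))]
  let profits := (PySem.List.pyRange 0 (names.length : Int) 1).map
    (fun i => PySem.List.pyGetD value i 0 - PySem.List.pyGetD costs i 0)
  -- worst = min(profits)  (profits nonempty under Pre_)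
  let worst := (PySem.List.min? profits (fun x => x)).getD 0
  -- j = len(profits) - 1 - profits[::-1].index(worst)
  let j : Int := (profits.length : Int) - 1 -
    (((PySem.List.index? ((PySem.List.slice? profits none none (-1)).getD []) worst).getD 0 : Nat) : Int)
  PySem.List.pyGetD names j "" ++ " with a net profitability of " ++ PySem.Int.toStr worst

-- ===== PRECONDITION & SPEC =====
-- Pre_ = exactly the inputs where A returns: names nonempty and costs/value at least as long
-- as names (otherwise A raises IndexError).
def Pre_least_profit (names : List String) (costs : List Int) (value : List Int) : Prop :=
  names ≠ [] ∧ names.length ≤ costs.length ∧ names.length ≤ value.length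
instance (names : List String) (costs : List Int) (value : List Int) : Decidable (Pre_least_profit names costs value) := by unfold Pre_least_profit; infer_instance
def pvWitness_least_profit : List String × List Int × List Int := (["a", "b"], [1, 2], [3, 1])

def Spec_least_profit (names : List String) (costs : List Int) (value : List Int) (out : String) : Prop := out = least_profit_alt names costs value
instance (names : List String) (costs : List Int) (value : List Int) (out : String) : Decidable (Spec_least_profit names costs value out) := by unfold Spec_least_profit; infer_instance

-- ===== CLAIM (what is proved, stated in full; the proofs are below) =====
def Claim_equal_least_profit : Prop := ∀ (names : List String) (costs : List Int) (value : List Int), Dom_least_profit names costs value → Pre_least_profit names costs value → Spec_least_profit names costs value (least_profit names costs value)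

-- ===== LEMMAS AND PROOFS =====

-- A's loop step on (name, profit) pairs.
def lpStep (st p : String × Int) : String × Int := if p.2 ≤ st.2 then p else st

-- The fold computes the LAST minimal pair: reading the reversed list, everything before
-- the result is strictly larger, everything after is ≥.
theorem lpFold_last_min (L : List (String × Int)) (a : String × Int) :
    ∃ pre suf, (a :: L).reverse = pre ++ (L.foldl lpStep a) :: suf ∧
      (∀ q ∈ pre, (L.foldl lpStep a).2 < q.2) ∧ (∀ q ∈ suf, (L.foldl lpStep a).2 ≤ q.2) := by
  induction L using List.reverseRecOn with
  | nil => exact ⟨[], [], by simp, by simp, by simp⟩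
  | append_singleton L p ih =>
    obtain ⟨pre, suf, hdec, hpre, hsuf⟩ := ih
    rw [List.foldl_append, List.foldl_cons, List.foldl_nil]
    by_cases h : p.2 ≤ (L.foldl lpStep a).2
    · have e : lpStep (L.foldl lpStep a) p = p := by simp [lpStep, h]
      rw [e]
      refine ⟨[], (a :: L).reverse, by simp, by simp, ?_⟩
      intro q hq
      rw [hdec] at hq
      rcases List.mem_append.mp hq with h1 | h1
      · exact le_trans h (le_of_lt (hpre q h1))
      · rcases List.mem_cons.mp h1 with h2 | h2
        · exact h2 ▸ h
        · exact le_trans h (hsuf q h2)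
    · have e : lpStep (L.foldl lpStep a) p = L.foldl lpStep a := by simp [lpStep, h]
      rw [e]
      refine ⟨p :: pre, suf, ?_, ?_, hsuf⟩
      · rw [show (a :: (L ++ [p])).reverse = p :: (a :: L).reverse by simp, hdec]
        rfl
      · intro q hq
        rcases List.mem_cons.mp hq with h1 | h1
        · exact h1 ▸ lt_of_not_ge h
        · exact hpre q h1

theorem least_profit_spec_aux (names : List String) (costs : List Int) (value : List Int)
    (hne : names ≠ []) (hc : names.length ≤ costs.length) (hv : names.length ≤ value.length) :
    least_profit names costs value = least_profit_alt names costs value := by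
  have hn : 0 < names.length := by
    cases names with
    | nil => exact absurd rfl hne
    | cons _ _ => simp
  set n := names.length with hn_def
  -- the (name, profit) pair at index i
  set pair : Int → String × Int :=
    fun i => (PySem.List.pyGetD names i "", PySem.List.pyGetD value i 0 - PySem.List.pyGetD costs i 0) with hpair
  set M : List (String × Int) := (PySem.List.pyRange 0 (n : Int) 1).map pair with hM
  set T : List (String × Int) := (PySem.List.pyRange 1 (n : Int) 1).map pair with hT
  have hMT : M = pair 0 :: T := by
    rw [hM, hT, PySem.List.pyRange_one_cons (by exact_mod_cast hn), List.map_cons]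
    norm_num
  set r := T.foldl lpStep (pair 0) with hr
  -- A's side: the fold over indices is the fold over pairs
  have hA : least_profit names costs value =
      r.1 ++ " with a net profitability of " ++ PySem.Int.toStr r.2 := by
    unfold least_profit
    rw [hr, hT, List.foldl_map]
    rfl
  -- decomposition of M.reverse around r
  obtain ⟨pre, suf, hdec, hpre, hsuf⟩ := lpFold_last_min T (pair 0)
  rw [← hMT, ← hr] at hdec
  have hlenM : M.length = n := by simp [hM, PySem.List.length_pyRange_one]
  have hlen : pre.length + (1 + suf.length) = n := by
    have := congrArg List.length hdec
    simp at this
    omega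
  -- B's profits list is M.map snd
  have hprofits : (PySem.List.pyRange 0 (n : Int) 1).map
      (fun i => PySem.List.pyGetD value i 0 - PySem.List.pyGetD costs i 0) = M.map Prod.snd := by
    rw [hM, List.map_map]; rfl
  -- every profit is ≥ r.2
  have hrmin : ∀ x ∈ M.map Prod.snd, r.2 ≤ x := by
    intro x hx
    obtain ⟨q, hq, rfl⟩ := List.mem_map.mp hx
    have hq' : q ∈ M.reverse := List.mem_reverse.mpr hq
    rw [hdec] at hq'
    rcases List.mem_append.mp hq' with h1 | h1
    · exact le_of_lt (hpre q h1)
    · rcases List.mem_cons.mp h1 with h2 | h2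
      · exact h2 ▸ le_refl _
      · exact hsuf q h2
  have hrmem : r.2 ∈ M.map Prod.snd := by
    refine List.mem_map.mpr ⟨r, ?_, rfl⟩
    have : r ∈ M.reverse := by rw [hdec]; simp
    exact List.mem_reverse.mp this
  -- min(profits) = r.2
  have hmin : PySem.List.min? (M.map Prod.snd) (fun x => x) = some r.2 := by
    rcases h : PySem.List.min? (M.map Prod.snd) (fun x => x) with _ | m
    · rw [PySem.List.min?_eq_none_iff] at h
      rw [h] at hrmem; simp at hrmem
    · have hmmem := PySem.List.min?_mem h
      have hmmin := PySem.List.min?_isMin h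
      have := le_antisymm (hmmin r.2 hrmem) (hrmin m hmmem)
      rw [this]
  -- reversed profits decompose with no r.2 before position pre.length
  have hrevdec : (M.map Prod.snd).reverse = pre.map Prod.snd ++ r.2 :: suf.map Prod.snd := by
    rw [← List.map_reverse, hdec]; simp
  have hidx : PySem.List.index? ((M.map Prod.snd).reverse) r.2 = some pre.length := by
    have hnotin : r.2 ∉ pre.map Prod.snd := by
      intro hmem
      obtain ⟨q, hq, hq2⟩ := List.mem_map.mp hmem
      exact absurd hq2.symm (ne_of_lt (hpre q hq))
    exact (PySem.List.index?_eq_some_iff _ _ _).mpr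
      ⟨pre.map Prod.snd, suf.map Prod.snd, hrevdec, by simp, hnotin⟩
  -- M's fst's are exactly names, and r sits at index suf.length of M
  have hfst : M.map Prod.fst = names := by
    rw [hM, List.map_map]
    have := PySem.List.map_pyGetD_pyRange_zero (xs := names) (d := "")
    simpa using this
  have hMeq : M = suf.reverse ++ r :: pre.reverse := by
    have := congrArg List.reverse hdec
    simpa using this
  have hname : names.getD suf.length "" = r.1 := by
    rw [← hfst, hMeq]
    have : (suf.reverse ++ r :: pre.reverse).map Prod.fst
        = suf.reverse.map Prod.fst ++ r.1 :: pre.reverse.map Prod.fst := by simp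
    rw [this]
    have hl : (suf.reverse.map Prod.fst).length = suf.length := by simp
    rw [← hl]
    simp
  -- assemble B
  rw [hA]
  unfold least_profit_alt
  simp only [← hn_def]
  simp only [hprofits, hmin, PySem.List.slice?_none_none_neg_one, Option.getD_some,
    List.length_map, hlenM, hidx]
  have hj : (n : Int) - 1 - (pre.length : Int) = ((suf.length : Nat) : Int) := by omega
  rw [hj, PySem.List.pyGetD_natCast, hname]
-- ===== VERDICT (by name: the statement is the Claim_ definition above) =====
theorem least_profit_spec : Claim_equal_least_profit := by
  intro names costs value _ hpre
  exact least_profit_spec_aux names costs value hpre.1 hpre.2.1 hpre.2.2
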